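-- pv_equiv track=rewrite | github.com/hopecommon/openhands4bench | refer/dynamic_context_agent_dev.py | _group_turns
-- ===== SOURCE A (Python) =====
-- from typing import Optional, List, Tuple
--
-- def _group_turns(messages: List[dict]) -> List[List[dict]]:
--     groups = []
--     current_group = []
--     for msg in messages:
--         role = msg.get('role')
--         if not current_group:
--             current_group.append(msg)
--             continue
--         last_role = current_group[-1].get('role')
--         # Group assistant and immediately following tool calls
--         if role == 'tool' and (last_role == 'assistant' or last_role == 'tool'):
--             current_group.append(msg)
--         else:
--             groups.append(current_group)
--             current_group = [msg]
--     if current_group: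
--         groups.append(current_group)
--     return groups
-- ===== SOURCE B (Python) =====
-- def _group_turns(messages):
--     # Index-based run scanner: for each group, advance `end` past the maximal
--     # run of mergeable adjacent pairs, slice messages[start:end], repeat.
--     groups = []
--     n = len(messages)
--     start = 0
--     while start < n:
--         end = start + 1
--         while (end < n
--                and messages[end].get('role') == 'tool'
--                and messages[end - 1].get('role') in ('assistant', 'tool')):
--             end += 1
--         groups.append(messages[start:end])
--         start = end
--     return groups
-- ===== Notes on version B (the rewrite author's own statement) =====
-- stated objective: alternative
-- what changed: Replaces A's element-by-element accumulator loop (grow current_group, compare with its last element, flush at the end) by an index-based scanner that finds each group's end with an inner while over adjacent pairs and emits the group as a slice messages[start:end]; no current-group list is ever maintained.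
import Mathlib
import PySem

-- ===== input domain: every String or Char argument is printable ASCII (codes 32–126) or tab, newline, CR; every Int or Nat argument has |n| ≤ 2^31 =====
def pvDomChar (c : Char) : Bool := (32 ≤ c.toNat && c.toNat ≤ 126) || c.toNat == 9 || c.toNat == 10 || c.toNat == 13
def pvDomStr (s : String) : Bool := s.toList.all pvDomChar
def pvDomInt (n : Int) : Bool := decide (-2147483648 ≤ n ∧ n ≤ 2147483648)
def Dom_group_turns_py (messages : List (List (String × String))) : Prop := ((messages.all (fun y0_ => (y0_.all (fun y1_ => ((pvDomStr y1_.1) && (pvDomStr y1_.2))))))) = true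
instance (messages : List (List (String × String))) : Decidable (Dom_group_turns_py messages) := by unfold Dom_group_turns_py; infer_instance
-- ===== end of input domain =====

-- B replaces A's element-by-element accumulator loop by an index-based run scanner that
-- finds each group's end with an inner while over adjacent pairs and slices it out
-- (objective: alternative; same linear cost).

-- shared helper: msg.get('role') on an association list (first match)
def getRole (m : List (String × String)) : Option String :=
  (m.find? (fun p => p.1 == "role")).map (·.2)

-- ===== PORT A =====
-- loop body of A's 'for msg in messages'
def stepA (st : List (List (List (String × String))) × List (List (String × String)))
    (msg : List (String × String)) :
    List (List (List (String × String))) × List (List (String × String)) :=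
  let role := getRole msg
  if st.2.isEmpty then (st.1, st.2 ++ [msg])
  else
    let last_role := getRole (PySem.List.pyGetD st.2 (-1) [])
    if role == some "tool" && (last_role == some "assistant" || last_role == some "tool") then
      (st.1, st.2 ++ [msg])
    else
      (st.1 ++ [st.2], [msg])

def group_turns_py (messages : List (List (String × String))) : List (List (List (String × String))) :=
  let st := messages.foldl stepA ([], [])
  if st.2.isEmpty then st.1 else st.1 ++ [st.2]

-- ===== PORT B =====
-- inner 'while' of B: advance `end` while the adjacent pair (end-1, end) merges;
-- both indices are in range whenever 1 ≤ e, so getD is exact for Python's messages[...]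
def runEndB (messages : List (List (String × String))) (e : Nat) : Nat :=
  if _h : e < messages.length then
    if getRole (messages.getD e []) == some "tool" &&
       (getRole (messages.getD (e - 1) []) == some "assistant" ||
        getRole (messages.getD (e - 1) []) == some "tool") then
      runEndB messages (e + 1)
    else e
  else e
termination_by messages.length - e

theorem runEndB_ge (messages : List (List (String × String))) (e : Nat) :
    e ≤ runEndB messages e := by
  unfold runEndB
  split
  · split
    · have := runEndB_ge messages (e + 1); omega
    · exact Nat.le_refl e
  · exact Nat.le_refl e
termination_by messages.length - e

-- outer 'while start < n' of B: slice out one group, continue at its end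
def outerB (messages : List (List (String × String))) (start : Nat)
    (groups : List (List (List (String × String)))) : List (List (List (String × String))) :=
  if _h : start < messages.length then
    let e := runEndB messages (start + 1)
    outerB messages e
      (groups ++ [PySem.List.slice messages (some (start : Int)) (some (e : Int))])
  else groups
termination_by messages.length - start
decreasing_by
  have := runEndB_ge messages (start + 1); omega

def group_turns_py_alt (messages : List (List (String × String))) : List (List (List (String × String))) :=
  outerB messages 0 []

-- ===== PRECONDITION & SPEC =====
def Spec_group_turns_py (messages : List (List (String × String))) (out : List (List (List (String × String)))) : Prop := out = group_turns_py_alt messages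
instance (messages : List (List (String × String))) (out : List (List (List (String × String)))) : Decidable (Spec_group_turns_py messages out) := by unfold Spec_group_turns_py; infer_instance

-- ===== CLAIM (what is proved, stated in full; the proofs are below) =====
def Claim_equal_group_turns_py : Prop := ∀ (messages : List (List (String × String))), Dom_group_turns_py messages → Spec_group_turns_py messages (group_turns_py messages)

-- ===== LEMMAS AND PROOFS =====

-- the adjacent-pair merge rule
def Rb (p x : List (String × String)) : Bool :=
  getRole x == some "tool" &&
    (getRole p == some "assistant" || getRole p == some "tool")

-- length of the run merging back through predecessor p
def chain (p : List (String × String)) : List (List (String × String)) → Nat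
  | [] => 0
  | x :: xs => if Rb p x then 1 + chain x xs else 0

-- reference recursion: rb p l = (groups of the suffix l, leading run of l merging through p)
def rb (p : Option (List (String × String))) :
    List (List (String × String)) →
    List (List (List (String × String))) × List (List (String × String))
  | [] => ([], [])
  | x :: xs =>
    let r := rb (some x) xs
    if (match p with
        | none => true
        | some pm => !(Rb pm x)) then
      ((x :: r.2) :: r.1, [])
    else
      (r.1, x :: r.2)

theorem chain_le (p : List (String × String)) (l : List (List (String × String))) :
    chain p l ≤ l.length := by
  induction l generalizing p with
  | nil => simp [chain]
  | cons x xs ih =>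
    simp only [chain]
    split
    · have := ih x; simp; omega
    · simp

-- rb on a 'some' predecessor = (groups of what is past the run, the run itself)
theorem rb_some_chain (l : List (List (String × String))) (p : List (String × String)) :
    rb (some p) l = ((rb none (l.drop (chain p l))).1, l.take (chain p l)) := by
  induction l generalizing p with
  | nil => simp [rb, chain]
  | cons x xs ih =>
    cases hm : Rb p x with
    | false => simp [rb, chain, hm]
    | true =>
      simp only [rb, chain, hm, if_true, Bool.not_true]
      rw [ih x, show 1 + chain x xs = chain x xs + 1 from by omega]
      simp

-- A's forward loop with nonempty current group c
theorem foldA_rb (l : List (List (String × String))) (groups : List (List (List (String × String))))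
    (c : List (List (String × String))) (hc : c ≠ []) :
    (fun st => if st.2.isEmpty then st.1 else st.1 ++ [st.2])
        (l.foldl stepA (groups, c)) =
      groups ++ (c ++ (rb (some (PySem.List.pyGetD c (-1) [])) l).2) ::
        (rb (some (PySem.List.pyGetD c (-1) [])) l).1 := by
  induction l generalizing groups c with
  | nil => simp [rb, hc]
  | cons x xs ih =>
    have hce : c.isEmpty = false := by simpa using hc
    cases hm : Rb (PySem.List.pyGetD c (-1) []) x with
    | true =>
      have hstep : stepA (groups, c) x = (groups, c ++ [x]) := by
        have hm' := hm; unfold Rb at hm'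
        simp only [stepA, hce, hm']; simp
      rw [List.foldl_cons, hstep, ih groups (c ++ [x]) (by simp)]
      rw [PySem.List.pyGetD_neg_one_append_singleton c x []]
      simp [rb, hm]
    | false =>
      have hstep : stepA (groups, c) x = (groups ++ [c], [x]) := by
        have hm' := hm; unfold Rb at hm'
        simp only [stepA, hce, hm']; simp
      rw [List.foldl_cons, hstep, ih (groups ++ [c]) [x] (by simp)]
      rw [show PySem.List.pyGetD ([x] : List (List (String × String))) (-1) [] = x from
        PySem.List.pyGetD_neg_one_append_singleton [] x []]
      simp [rb, hm]

-- B's inner while computes e + the run length starting at e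
theorem runEndB_chain (messages : List (List (String × String))) (e : Nat)
    (h1 : 1 ≤ e) (h2 : e ≤ messages.length) :
    runEndB messages e = e + chain (messages.getD (e - 1) []) (messages.drop e) := by
  unfold runEndB
  split
  · rename_i hlt
    have hdrop : messages.drop e = messages.getD e [] :: messages.drop (e + 1) := by
      rw [List.getD_eq_getElem messages [] hlt]
      exact List.drop_eq_getElem_cons hlt
    rw [hdrop]
    show _ = e + chain _ (_ :: _)
    simp only [chain]
    cases hm : Rb (messages.getD (e - 1) []) (messages.getD e []) with
    | true =>
      have hm' := hm; unfold Rb at hm'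
      rw [if_pos hm']
      rw [runEndB_chain messages (e + 1) (by omega) (by omega)]
      have : e + 1 - 1 = e := by omega
      rw [this]
      simp; omega
    | false =>
      have hm' := hm; unfold Rb at hm'
      rw [if_neg (by rw [hm']; simp)]
      simp
  · rename_i hge
    have : messages.drop e = [] := List.drop_eq_nil_of_le (by omega)
    rw [this]; simp [chain]
termination_by messages.length - e

-- B's outer while collects exactly rb's groups of the remaining suffix
theorem outerB_rb (k : Nat) (messages : List (List (String × String))) (s : Nat)
    (acc : List (List (List (String × String))))
    (hs : s ≤ messages.length) (hk : messages.length - s ≤ k) :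
    outerB messages s acc = acc ++ (rb none (messages.drop s)).1 := by
  induction k generalizing s acc with
  | zero =>
    have hse : s = messages.length := by omega
    unfold outerB
    rw [dif_neg (by omega)]
    subst hse; simp [rb]
  | succ k ih =>
    unfold outerB
    split
    · rename_i hlt
      have hx : messages.getD (s + 1 - 1) [] = messages.getD s [] := by norm_num
      have hch := chain_le (messages.getD s []) (messages.drop (s + 1))
      have hlen : (messages.drop (s + 1)).length = messages.length - (s + 1) := by simp
      set c := chain (messages.getD s []) (messages.drop (s + 1)) with hc
      have he : runEndB messages (s + 1) = s + 1 + c := by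
        rw [runEndB_chain messages (s + 1) (by omega) (by omega), hx]
      rw [he]
      rw [ih (s + 1 + c) _ (by omega) (by omega)]
      have hdrop : messages.drop s = messages.getD s [] :: messages.drop (s + 1) := by
        rw [List.getD_eq_getElem messages [] hlt]
        exact List.drop_eq_getElem_cons hlt
      have hslice : PySem.List.slice messages (some (s : Int)) (some ((s + 1 + c : Nat) : Int)) =
          messages.getD s [] :: (messages.drop (s + 1)).take c := by
        rw [PySem.List.slice_natCast, hdrop]
        have : s + 1 + c - s = c + 1 := by omega
        rw [this]
        simp [List.take_succ_cons]
      rw [hslice, hdrop]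
      show acc ++ [_] ++ _ = acc ++ (rb none (_ :: _)).1
      simp only [rb]
      rw [rb_some_chain, ← hc, List.drop_drop]
      simp
    · rename_i hge
      have hse : s = messages.length := by omega
      subst hse; simp [rb]

-- ===== VERDICT (by name: the statement is the Claim_ definition above) =====
theorem group_turns_py_spec : Claim_equal_group_turns_py := by
  intro messages _
  unfold Spec_group_turns_py
  have hB : group_turns_py_alt messages = (rb none messages).1 := by
    unfold group_turns_py_alt
    rw [outerB_rb messages.length messages 0 [] (by omega) (by omega)]
    simp
  cases messages with
  | nil => simp [group_turns_py, group_turns_py_alt, outerB]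
  | cons m rest =>
    rw [hB]
    have hA : group_turns_py (m :: rest) =
        (m :: (rb (some m) rest).2) :: (rb (some m) rest).1 := by
      unfold group_turns_py
      rw [List.foldl_cons]
      have h1 : stepA ([], []) m = ([], [m]) := by simp [stepA]
      rw [h1]
      have h2 := foldA_rb rest [] [m] (by simp)
      rw [show PySem.List.pyGetD ([m] : List (List (String × String))) (-1) [] = m from
        PySem.List.pyGetD_neg_one_append_singleton [] m []] at h2
      simpa using h2
    rw [hA]
    simp [rb]
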